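-- pv_equiv track=rewrite | github.com/TheBigKahuna353/School-Stuff | Cosc260/testing.py | should_prune
-- ===== SOURCE A (Python) =====
-- def should_prune(candiate):
--     """Returns True if the tree should be pruned at this point."""
--
--     # Complete the code
--     for x in range(len(candiate)):
--         rows = []
--         cols = []
--         for y in range(len(candiate)):
--             if candiate[x][y] is not None:
--                 if candiate[x][y] not in rows:
--                     rows.append(candiate[x][y])
--                 else:
--                     return True
--             if candiate[y][x] is not None:
--                 if candiate[y][x] not in cols and candiate[y][x] is not None:
--                     cols.append(candiate[y][x])
--                 else:
--                     return True
--     return False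
-- ===== SOURCE B (Python) =====
-- def should_prune(candiate):
--     """Returns True if the tree should be pruned at this point."""
--     n = len(candiate)
--     lines = [[candiate[x][y] for y in range(n)] for x in range(n)]
--     lines += [[candiate[y][x] for y in range(n)] for x in range(n)]
--     for line in lines:
--         vals = sorted(v for v in line if v is not None)
--         if any(a == b for a, b in zip(vals, vals[1:])):
--             return True
--     return False
-- ===== Notes on version B (the rewrite author's own statement) =====
-- stated objective: alternative
-- what changed: B first materialises all rows and the transposed columns as explicit line lists, then detects a duplicate in each line by sorting its non-None values and scanning for an equal adjacent pair, instead of A's interleaved per-element membership accumulators with early return.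
-- outside the precondition, e.g. on should_prune([[1, 1], []]): A returns True, B raises IndexError
import Mathlib
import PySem

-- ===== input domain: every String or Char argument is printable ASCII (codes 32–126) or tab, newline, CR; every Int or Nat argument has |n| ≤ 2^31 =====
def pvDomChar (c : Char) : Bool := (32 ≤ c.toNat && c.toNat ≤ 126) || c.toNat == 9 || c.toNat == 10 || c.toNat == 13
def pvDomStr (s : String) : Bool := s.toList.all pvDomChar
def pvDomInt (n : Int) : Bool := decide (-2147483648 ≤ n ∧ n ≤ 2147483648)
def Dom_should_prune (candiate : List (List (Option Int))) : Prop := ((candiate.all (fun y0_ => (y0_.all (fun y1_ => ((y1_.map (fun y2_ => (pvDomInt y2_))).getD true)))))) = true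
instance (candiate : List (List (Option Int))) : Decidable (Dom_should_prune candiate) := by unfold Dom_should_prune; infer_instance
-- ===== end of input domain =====

-- B materialises the row lines and the transposed column lines, then finds a duplicate in a
-- line by sorting its non-None values and scanning for an equal adjacent pair, instead of A's
-- interleaved incremental membership accumulators with early return (alternative algorithm;
-- same return value on all grids admitted by Pre_).


-- cell access candiate[x][y]; total via getD (exact inside Pre_, where every index is in range)
def pvCell (c : List (List (Option Int))) (x y : Int) : Option Int :=
  (PySem.List.pyGet? ((PySem.List.pyGet? c x).getD []) y).getD none

-- ===== PORT A =====
-- inner loop over y; rows/cols are A's accumulators, early 'return True' becomes result true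
def aInner (c : List (List (Option Int))) (x : Int) (ys : List Int)
    (rows cols : List (Option Int)) : Bool :=
  match ys with
  | [] => false
  | y :: ys' =>
    let v := pvCell c x y
    let w := pvCell c y x
    if v.isSome then
      if rows.contains v then true
      else
        if w.isSome then
          if cols.contains w || !w.isSome then true
          else aInner c x ys' (rows ++ [v]) (cols ++ [w])
        else aInner c x ys' (rows ++ [v]) cols
    else
      if w.isSome then
        if cols.contains w || !w.isSome then true
        else aInner c x ys' rows (cols ++ [w])
      else aInner c x ys' rows cols

def aOuter (c : List (List (Option Int))) (xs : List Int) : Bool :=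
  match xs with
  | [] => false
  | x :: xs' =>
    if aInner c x (PySem.List.pyRange 0 (c.length : Int) 1) [] [] then true
    else aOuter c xs'

def should_prune (candiate : List (List (Option Int))) : Bool :=
  aOuter candiate (PySem.List.pyRange 0 (candiate.length : Int) 1)

-- ===== PORT B =====
-- sorted(v for v in line if v is not None): extract the non-None values, sort them
def bVals (line : List (Option Int)) : List Int :=
  PySem.List.sorted (line.filterMap id) (fun v => v) false

-- any(a == b for a, b in zip(vals, vals[1:])); vals[1:] = drop 1 (exact: start 1 ≥ 0)
def bHasAdj (vals : List Int) : Bool :=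
  (vals.zip (vals.drop 1)).any (fun p => p.1 == p.2)

def should_prune_alt (candiate : List (List (Option Int))) : Bool :=
  let ys := PySem.List.pyRange 0 (candiate.length : Int) 1
  let lines := (ys.map (fun x => ys.map (fun y => pvCell candiate x y)))
            ++ (ys.map (fun x => ys.map (fun y => pvCell candiate y x)))
  lines.any (fun line => bHasAdj (bVals line))

-- ===== PRECONDITION & SPEC =====
-- Pre_ excludes ragged grids (some row shorter than len(candiate)): there both programs
-- normally raise IndexError, but A may accidentally early-return True before reaching the
-- short row while B (building all lines first) raises — an artefact of traversal order,
-- so such grids are excluded.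
def Pre_should_prune (candiate : List (List (Option Int))) : Prop :=
  ∀ row ∈ candiate, candiate.length ≤ row.length
instance (candiate : List (List (Option Int))) : Decidable (Pre_should_prune candiate) := by
  unfold Pre_should_prune; infer_instance

def pvWitness_should_prune : List (List (Option Int)) :=
  [[some 1, none], [some 2, some 1]]

def Spec_should_prune (candiate : List (List (Option Int))) (out : Bool) : Prop := out = should_prune_alt candiate
instance (candiate : List (List (Option Int))) (out : Bool) : Decidable (Spec_should_prune candiate out) := by unfold Spec_should_prune; infer_instance

-- ===== CLAIM (what is proved, stated in full; the proofs are below) =====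
def Claim_equal_should_prune : Prop := ∀ (candiate : List (List (Option Int))), Dom_should_prune candiate → Pre_should_prune candiate → Spec_should_prune candiate (should_prune candiate)

-- ===== LEMMAS AND PROOFS =====

-- proof-only model of A's incremental duplicate scan of ONE stream, given already-seen values
def hasDupFrom (l seen : List (Option Int)) : Bool :=
  match l with
  | [] => false
  | v :: l' => if seen.contains v then true else hasDupFrom l' (seen ++ [v])

lemma hasDupFrom_true_iff (l : List (Option Int)) :
    ∀ seen : List (Option Int), seen.Nodup →
      (hasDupFrom l seen = true ↔ ¬ (seen ++ l).Nodup) := by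
  induction l with
  | nil => intro seen h; simp [hasDupFrom, h]
  | cons v l' ih =>
    intro seen h
    by_cases hv : v ∈ seen
    · have hvc : seen.contains v = true := by simpa using hv
      simp only [hasDupFrom, hvc, if_true, true_iff]
      intro hnd
      exact (List.nodup_append.mp hnd).2.2 v hv v (List.mem_cons_self ..) rfl
    · have hvc : seen.contains v = false := by simpa using hv
      have hnd : (seen ++ [v]).Nodup :=
        h.append (List.nodup_singleton v)
          (fun a ha hav => by simp at hav; exact hv (hav ▸ ha))
      simp only [hasDupFrom, hvc, Bool.false_eq_true, if_false]
      rw [ih (seen ++ [v]) hnd, List.append_assoc]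
      simp

-- A's interleaved inner loop decomposes into two independent stream scans
lemma aInner_eq (c : List (List (Option Int))) (x : Int) (ys : List Int) :
    ∀ rows cols : List (Option Int),
      aInner c x ys rows cols =
        (hasDupFrom ((ys.map (fun y => pvCell c x y)).filter Option.isSome) rows ||
         hasDupFrom ((ys.map (fun y => pvCell c y x)).filter Option.isSome) cols) := by
  induction ys with
  | nil => intro rows cols; simp [aInner, hasDupFrom]
  | cons y ys' ih =>
    intro rows cols
    by_cases hv : (pvCell c x y).isSome <;> by_cases hw : (pvCell c y x).isSome <;>
      simp only [aInner, List.map_cons, List.filter_cons, hv, hw, Bool.not_true,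
        Bool.not_false, if_true, Bool.or_false, hasDupFrom] <;>
      by_cases hr : rows.contains (pvCell c x y) <;>
      by_cases hc : cols.contains (pvCell c y x) <;>
      simp [ih, Bool.or_assoc, Bool.or_left_comm]

-- filtering out the Nones is mapping some over the extracted values
lemma filter_isSome_eq_map_some (l : List (Option Int)) :
    l.filter Option.isSome = (l.filterMap id).map some := by
  induction l with
  | nil => rfl
  | cons v l' ih => cases v <;> simp [ih]

-- adjacent-equal scan on a (≤)-ordered list detects exactly non-Nodup
lemma adj_false_iff : ∀ s : List Int, s.Pairwise (· ≤ ·) →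
    (((s.zip (s.drop 1)).any (fun p => p.1 == p.2)) = false ↔ s.Nodup) := by
  intro s
  induction s with
  | nil => simp
  | cons a t ih =>
    cases t with
    | nil => simp
    | cons b t' =>
      intro hp
      have hab : a ≤ b := (List.pairwise_cons.mp hp).1 b (List.mem_cons_self ..)
      have hat : ∀ x ∈ t', a ≤ x := fun x hx =>
        (List.pairwise_cons.mp hp).1 x (List.mem_cons_of_mem _ hx)
      have hbt : ∀ x ∈ t', b ≤ x := fun x hx =>
        (List.pairwise_cons.mp (List.pairwise_cons.mp hp).2).1 x hx
      have ih' := ih (List.pairwise_cons.mp hp).2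
      simp only [List.drop_one, List.tail_cons, List.zip_cons_cons, List.any_cons,
        Bool.or_eq_false_iff, beq_eq_false_iff_ne, ne_eq] at ih' ⊢
      rw [ih']
      constructor
      · rintro ⟨hne, hnd⟩
        refine List.nodup_cons.mpr ⟨?_, hnd⟩
        intro hmem
        rcases List.mem_cons.mp hmem with h | h
        · exact hne h
        · have := hat _ h
          have hab' : a < b := lt_of_le_of_ne hab hne
          have := hbt _ h
          omega
      · intro hnd
        have h1 := List.nodup_cons.mp hnd
        exact ⟨fun h => h1.1 (h ▸ List.mem_cons_self ..), h1.2⟩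

-- B's per-line duplicate test detects exactly non-Nodup of the extracted values
lemma bHasAdj_true_iff (line : List (Option Int)) :
    bHasAdj (bVals line) = true ↔ ¬ (line.filter Option.isSome).Nodup := by
  have hperm : (bVals line).Perm (line.filterMap id) := PySem.List.sorted_perm ..
  have hpw : (bVals line).Pairwise (· ≤ ·) := PySem.List.sorted_pairwise ..
  have := adj_false_iff (bVals line) hpw
  rw [show (¬ (line.filter Option.isSome).Nodup ↔ ¬ (bVals line).Nodup) from ?_]
  · constructor
    · intro h hnd
      simp only [bHasAdj] at h
      rw [this.mpr hnd] at h
      exact Bool.false_ne_true h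
    · intro h
      cases hb : bHasAdj (bVals line)
      · exact absurd (this.mp (by simpa [bHasAdj] using hb)) h
      · rfl
  · rw [filter_isSome_eq_map_some, List.nodup_map_iff (Option.some_injective _),
        hperm.nodup_iff]
-- the per-index bodies agree
lemma body_eq (c : List (List (Option Int))) (x : Int) :
    aInner c x (PySem.List.pyRange 0 (c.length : Int) 1) [] [] =
      (bHasAdj (bVals ((PySem.List.pyRange 0 (c.length : Int) 1).map (fun y => pvCell c x y))) ||
       bHasAdj (bVals ((PySem.List.pyRange 0 (c.length : Int) 1).map (fun y => pvCell c y x)))) := by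
  rw [aInner_eq]
  congr 1 <;>
  · rw [Bool.eq_iff_iff, bHasAdj_true_iff,
      hasDupFrom_true_iff _ [] (List.nodup_nil), List.nil_append]

lemma aOuter_eq_any (c : List (List (Option Int))) (xs : List Int) :
    aOuter c xs = xs.any (fun x => aInner c x (PySem.List.pyRange 0 (c.length : Int) 1) [] []) := by
  induction xs with
  | nil => rfl
  | cons x xs' ih =>
    simp only [aOuter, List.any_cons, ih]
    by_cases h : aInner c x (PySem.List.pyRange 0 (c.length : Int) 1) [] [] = true <;>
      simp [h]

lemma any_or_split {α : Type} (xs : List α) (f g : α → Bool) :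
    xs.any (fun x => f x || g x) = (xs.any f || xs.any g) := by
  induction xs with
  | nil => rfl
  | cons x xs' ih =>
    simp only [List.any_cons, ih]
    cases f x <;> cases g x <;> cases xs'.any f <;> cases xs'.any g <;> rfl

-- ===== VERDICT (by name: the statement is the Claim_ definition above) =====
theorem should_prune_spec : Claim_equal_should_prune := by
  intro c _ _
  unfold Spec_should_prune should_prune should_prune_alt
  rw [aOuter_eq_any]
  simp only [List.any_append, List.any_map, Function.comp_def]
  rw [← any_or_split]
  exact congrArg _ (funext fun x => body_eq c x)
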